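-- pv_equiv track=rewrite | github.com/aspire87/og | functi.py | convert
-- ===== SOURCE A (Python) =====
-- def convert(stri):
--     stri = list(stri)
--     str_output = []
--     for el in stri:
--
--         if el.isdecimal():
--
--             str_output.append(el)
--         elif el.isalpha():
--             str_output.append(el.lower())
--     str_output = ''.join(str_output)
--     n = 2
--     str_output = [str_output[i:i + n] for i in range(0, len(str_output), n)]
--     str_output = (':'.join(str_output))
--     return str_output
-- ===== SOURCE B (Python) =====
-- def convert(stri):
--     out = []
--     n = 0
--     for el in stri:
--         if el.isdecimal():
--             ch = el
--         elif el.isalpha():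
--             ch = el.lower()
--         else:
--             continue
--         if n and n % 2 == 0:
--             out.append(':')
--         out.append(ch)
--         n += 1
--     return ''.join(out)
-- ===== Notes on version B (the rewrite author's own statement) =====
-- stated objective: simpler
-- what changed: B emits the colon-separated pairs in a single pass with a running count of kept characters, instead of building an intermediate filtered string and re-slicing it with a step-2 range comprehension.
import Mathlib
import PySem

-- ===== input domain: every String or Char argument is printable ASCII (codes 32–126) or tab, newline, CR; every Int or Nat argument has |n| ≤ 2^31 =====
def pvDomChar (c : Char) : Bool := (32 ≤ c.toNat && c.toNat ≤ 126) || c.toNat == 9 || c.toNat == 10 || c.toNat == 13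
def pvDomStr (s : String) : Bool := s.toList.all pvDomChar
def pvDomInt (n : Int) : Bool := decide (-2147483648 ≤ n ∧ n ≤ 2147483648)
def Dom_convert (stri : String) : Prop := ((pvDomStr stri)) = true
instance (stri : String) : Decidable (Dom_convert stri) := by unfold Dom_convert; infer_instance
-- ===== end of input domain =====

-- B computes the same string in one pass with a running count, instead of A's
-- filter-then-join-then-step-2-slice pipeline (objective: simpler).

-- ===== PORT A =====
-- str.isdecimal agrees with PySem.Chars.isdigit on the ASCII domain
def convert (stri : String) : String :=
  let chars := stri.toList
  let filtered := chars.foldl (fun acc el =>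
    if PySem.Chars.isdigit el then acc ++ [el]
    else if PySem.Chars.isalpha el then acc ++ [PySem.Chars.lowerChar el]
    else acc) []
  let pieces := (PySem.List.pyRange 0 (filtered.length : Int) 2).map
    (fun i => PySem.List.slice filtered (some i) (some (i + 2)))
  String.ofList (PySem.Chars.join [':'] pieces)

-- ===== PORT B =====
def convertAltGo : List Char → Nat → List Char → List Char
  | [], _, acc => acc
  | el :: rest, n, acc =>
    if PySem.Chars.isdigit el then
      convertAltGo rest (n + 1) (acc ++ (if n ≠ 0 ∧ n % 2 = 0 then [':', el] else [el]))
    else if PySem.Chars.isalpha el then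
      convertAltGo rest (n + 1)
        (acc ++ (if n ≠ 0 ∧ n % 2 = 0 then [':', PySem.Chars.lowerChar el] else [PySem.Chars.lowerChar el]))
    else convertAltGo rest n acc

def convert_alt (stri : String) : String :=
  String.ofList (convertAltGo stri.toList 0 [])

-- ===== PRECONDITION & SPEC =====
def Spec_convert (stri : String) (out : String) : Prop := out = convert_alt stri
instance (stri : String) (out : String) : Decidable (Spec_convert stri out) := by unfold Spec_convert; infer_instance

-- ===== CLAIM (what is proved, stated in full; the proofs are below) =====
def Claim_equal_convert : Prop := ∀ (stri : String), Dom_convert stri → Spec_convert stri (convert stri)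

-- ===== LEMMAS AND PROOFS =====

-- the filter of A written structurally
def pvFilt : List Char → List Char
  | [] => []
  | el :: rest =>
    if PySem.Chars.isdigit el then el :: pvFilt rest
    else if PySem.Chars.isalpha el then PySem.Chars.lowerChar el :: pvFilt rest
    else pvFilt rest

lemma pvFoldl_filt (chars : List Char) : ∀ acc : List Char,
    chars.foldl (fun acc el =>
      if PySem.Chars.isdigit el then acc ++ [el]
      else if PySem.Chars.isalpha el then acc ++ [PySem.Chars.lowerChar el]
      else acc) acc = acc ++ pvFilt chars := by
  induction chars with
  | nil => intro acc; simp [pvFilt]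
  | cons el rest ih =>
    intro acc
    simp only [List.foldl_cons, pvFilt]
    split_ifs with h1 h2 <;> simp [ih]

-- B's loop over the input equals a pair-grouping loop over the filtered list
def pvPairGo : List Char → Nat → List Char → List Char
  | [], _, acc => acc
  | c :: cs, n, acc => pvPairGo cs (n + 1) (acc ++ (if n ≠ 0 ∧ n % 2 = 0 then [':', c] else [c]))

lemma pvAltGo_eq_pairGo (chars : List Char) : ∀ (n : Nat) (acc : List Char),
    convertAltGo chars n acc = pvPairGo (pvFilt chars) n acc := by
  induction chars with
  | nil => intro n acc; simp [convertAltGo, pvFilt, pvPairGo]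
  | cons el rest ih =>
    intro n acc
    simp only [convertAltGo, pvFilt]
    split_ifs with h1 h2 <;> simp only [pvPairGo, ih] <;> split_ifs <;> rfl

-- 2-chunks of a list
def pvChunk2 : List Char → List (List Char)
  | [] => []
  | [a] => [[a]]
  | a :: b :: rest => [a, b] :: pvChunk2 rest

lemma pvRangeMap_eq_chunk2 (f : List Char) :
    (List.range ((f.length + 1) / 2)).map (fun k => (f.drop (2 * k)).take 2) = pvChunk2 f := by
  induction f using pvChunk2.induct with
  | case1 => simp [pvChunk2]
  | case2 a => simp [pvChunk2]
  | case3 a b rest ih =>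
    have hlen : ((a :: b :: rest).length + 1) / 2 = (rest.length + 1) / 2 + 1 := by
      simp only [List.length_cons]; omega
    rw [hlen, List.range_succ_eq_map, List.map_cons, List.map_map]
    have hcg : ∀ k ∈ List.range ((rest.length + 1) / 2),
          ((fun k => List.take 2 (List.drop (2 * k) (a :: b :: rest))) ∘ Nat.succ) k
            = (fun k => List.take 2 (List.drop (2 * k) rest)) k := by
        intro k _
        have h : 2 * Nat.succ k = (2 * k + 1) + 1 := by omega
        simp only [Function.comp_apply, h, List.drop_succ_cons]
    rw [List.map_congr_left hcg, ih]
    simp [pvChunk2]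

-- the A-side piece list is the 2-chunking of the filtered list
lemma pvPieces_eq_chunk2 (f : List Char) :
    (PySem.List.pyRange 0 (f.length : Int) 2).map
      (fun i => PySem.List.slice f (some i) (some (i + 2))) = pvChunk2 f := by
  rw [PySem.List.pyRange_of_pos 0 (f.length : Int) (by norm_num)]
  have hcount : (if (0 : Int) < (f.length : Int) then ((((f.length : Int)) - 0 + 2 - 1) / 2).toNat else 0)
      = (f.length + 1) / 2 := by
    split_ifs with h
    · omega
    · omega
  rw [hcount, List.map_map, ← pvRangeMap_eq_chunk2 f]
  apply List.map_congr_left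
  intro k _
  have h1 : (0 : Int) + 2 * (k : Int) = ((2 * k : Nat) : Int) := by push_cast; ring
  have h2 : (0 : Int) + 2 * (k : Int) + 2 = (((2 * k : Nat) : Int) + ((2 : Nat) : Int)) := by push_cast; ring
  simp only [Function.comp]
  rw [h1]
  have := PySem.List.slice_natCast_add (xs := f) (j := 2 * k) (n := 2)
  simpa using this

-- ':'-join written via a tail with leading colons
def pvColonTail : List (List Char) → List Char
  | [] => []
  | p :: ps => ':' :: p ++ pvColonTail ps

lemma pvJoin_cons (p : List Char) (ps : List (List Char)) :
    PySem.Chars.join [':'] (p :: ps) = p ++ pvColonTail ps := by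
  induction ps generalizing p with
  | nil => simp [PySem.Chars.join_singleton, pvColonTail]
  | cons q qs ih =>
    rw [PySem.Chars.join_cons_cons, pvColonTail, ih q]
    simp

lemma pvPairGo_even (f : List Char) : ∀ (n : Nat) (acc : List Char), n ≠ 0 → n % 2 = 0 →
    pvPairGo f n acc = acc ++ pvColonTail (pvChunk2 f) := by
  induction f using pvChunk2.induct with
  | case1 => intro n acc _ _; simp [pvPairGo, pvChunk2, pvColonTail]
  | case2 a => intro n acc h1 h2; simp [pvPairGo, pvChunk2, pvColonTail, h1, h2]
  | case3 a b rest ih =>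
    intro n acc h1 h2
    have hodd : ¬ ((n + 1) ≠ 0 ∧ (n + 1) % 2 = 0) := by omega
    simp only [pvPairGo, pvChunk2, pvColonTail, if_pos (And.intro h1 h2), if_neg hodd]
    rw [ih (n + 2) _ (by omega) (by omega)]
    simp

lemma pvPairGo_zero (f : List Char) (acc : List Char) :
    pvPairGo f 0 acc = acc ++ PySem.Chars.join [':'] (pvChunk2 f) := by
  match f with
  | [] => simp [pvPairGo, pvChunk2, PySem.Chars.join_nil]
  | [a] => simp [pvPairGo, pvChunk2, PySem.Chars.join_singleton]
  | a :: b :: rest =>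
    simp only [pvPairGo, pvChunk2]
    norm_num
    rw [pvPairGo_even rest 2 _ (by omega) (by omega), pvJoin_cons]
    simp

-- ===== VERDICT (by name: the statement is the Claim_ definition above) =====
theorem convert_spec : Claim_equal_convert := by
  intro stri _
  unfold Spec_convert convert convert_alt
  simp only
  rw [pvFoldl_filt stri.toList [], List.nil_append,
      pvPieces_eq_chunk2 (pvFilt stri.toList),
      pvAltGo_eq_pairGo stri.toList 0 [],
      pvPairGo_zero (pvFilt stri.toList) []]
  simp
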